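-- pv_equiv track=rewrite | github.com/TDK1969/My-Leetcode | daily/2021.7/1713.minimum-operations-to-make-a-subsequence.py | min0perations
-- ===== SOURCE A (Python) =====
-- import bisect
-- from typing import List
--
-- def min0perations(target: List[int], arr: List[int]) -> int:
--     # 分析:
--     # 本题要找最少操作次数，实际上就是找最长的公共子序列(这样需要的操作最少)
--     # 根据target中互不相同，我们知道每个数字对应的坐标唯一
--     # 于是最长公共子序列等价于arr用target的坐标转换后构成最长的上升子序列
--
--     # 数字对应坐标
--     idx_dict = {num: i for i, num in enumerate(target)}
--     # 300.最长上升子序列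
--     stack = []
--     for num in arr:
--         # 只有在target的数字才可能属于公共子序列
--         if num in idx_dict:
--             # 转换坐标
--             idx = idx_dict[num]
--             # 该坐标在当前栈中的位置
--             i = bisect.bisect_left(stack, idx)
--             # 如果在最后要加入元素，否则要修改该位置的元素
--             # 跟一般的讲，i代表了目前这个idx在stack中的大小位置，
--             # 在前面出现还比idx大的stack中的元素是无法和idx构成最长上升子序列的。
--             # i左边的数比idx小，可以和idx构成上升子序列，(idx构成的长度就是i+1)
--             # idx比i的值小，将i替换后可以方便后面构成更优的子序列(越小后面能加入的数越多)
--             if i == len(stack):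
--                 stack.append(0)
--             stack[i] = idx
--     # 最终stack的长度就构成了最长上升子序列的长度，用减法即可得到本题答案
--     return len(target) - len(stack)
-- ===== SOURCE B (Python) =====
-- def min0perations(target, arr):
--     # Map each target value to its index (last occurrence wins, like dict comp).
--     idx_dict = {num: i for i, num in enumerate(target)}
--     # Transform arr into target-index space; answer = len(target) - LIS(seq),
--     # computed with the classic quadratic DP instead of patience sorting.
--     seq = [idx_dict[num] for num in arr if num in idx_dict]
--     dp = []   # dp[i] = length of longest strictly increasing subseq ending at seq[i]
--     L = 0
--     for v in seq:
--         best = 0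
--         for x, d in zip(seq, dp):   # zip truncates to the already-processed prefix
--             if x < v and d > best:
--                 best = d
--         dp.append(best + 1)
--         if best + 1 > L:
--             L = best + 1
--     return len(target) - L
-- ===== Notes on version B (the rewrite author's own statement) =====
-- stated objective: alternative
-- what changed: Replaces A's patience-sorting LIS (binary-search stack via bisect_left) with the classic quadratic dynamic program dp[i] = longest strictly increasing subsequence ending at i over the index-transformed sequence, tracking a running maximum.
import Mathlib
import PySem

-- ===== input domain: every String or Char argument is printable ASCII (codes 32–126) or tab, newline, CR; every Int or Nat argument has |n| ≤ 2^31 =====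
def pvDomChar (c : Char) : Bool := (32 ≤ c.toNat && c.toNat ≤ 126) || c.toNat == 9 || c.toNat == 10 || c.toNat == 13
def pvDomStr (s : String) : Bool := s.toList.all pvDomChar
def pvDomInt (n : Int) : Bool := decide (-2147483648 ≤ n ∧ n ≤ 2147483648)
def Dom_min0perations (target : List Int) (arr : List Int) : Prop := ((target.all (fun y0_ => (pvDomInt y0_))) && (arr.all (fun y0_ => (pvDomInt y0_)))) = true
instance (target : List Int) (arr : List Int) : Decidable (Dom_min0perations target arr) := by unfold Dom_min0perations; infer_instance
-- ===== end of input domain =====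

-- B replaces A's patience-sorting/bisect LIS with the classic quadratic DP over the
-- index-transformed sequence (objective: alternative algorithm, same exact result).

-- ===== PORT A =====
def min0perations (target : List Int) (arr : List Int) : Int :=
  let idxDict : PySem.Dict Int Int :=
    (PySem.List.enumerate target).foldl (fun d p => d.insert p.2 p.1) PySem.Dict.empty
  let stack : List Int := arr.foldl (fun stack num =>
    match idxDict.get? num with
    | none => stack
    | some idx =>
      let i := PySem.List.bisectLeft stack idx
      let stack' := if i = stack.length then stack ++ [0] else stack
      stack'.set i idx) []
  (target.length : Int) - (stack.length : Int)

-- ===== PORT B =====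
def min0perations_alt (target : List Int) (arr : List Int) : Int :=
  let idxDict : PySem.Dict Int Int :=
    (PySem.List.enumerate target).foldl (fun d p => d.insert p.2 p.1) PySem.Dict.empty
  let seq : List Int := arr.filterMap (fun num => idxDict.get? num)
  let r : List Int × Int := seq.foldl (fun s v =>
      let best := (seq.zip s.1).foldl
        (fun best xd => if xd.1 < v ∧ xd.2 > best then xd.2 else best) 0
      (s.1 ++ [best + 1], if best + 1 > s.2 then best + 1 else s.2)) ([], 0)
  (target.length : Int) - r.2

-- ===== PRECONDITION & SPEC =====
def Spec_min0perations (target : List Int) (arr : List Int) (out : Int) : Prop := out = min0perations_alt target arr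
instance (target : List Int) (arr : List Int) (out : Int) : Decidable (Spec_min0perations target arr out) := by unfold Spec_min0perations; infer_instance

-- ===== CLAIM (what is proved, stated in full; the proofs are below) =====
def Claim_equal_min0perations : Prop := ∀ (target : List Int) (arr : List Int), Dom_min0perations target arr → Spec_min0perations target arr (min0perations target arr)

-- ===== LEMMAS AND PROOFS =====

-- A's loop body on one transformed index (after the dict hit).
def astep (st : List Int) (idx : Int) : List Int :=
  let i := PySem.List.bisectLeft st idx
  (if i = st.length then st ++ [0] else st).set i idx

-- B's inner scan: running max of d over pairs (x, d) with x < v.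
def bbest (v : Int) (l : List (Int × Int)) (b0 : Int) : Int :=
  l.foldl (fun best xd => if xd.1 < v ∧ xd.2 > best then xd.2 else best) b0

-- B's loop body.
def bstep (seq : List Int) (s : List Int × Int) (v : Int) : List Int × Int :=
  let best := bbest v (seq.zip s.1) 0
  (s.1 ++ [best + 1], if best + 1 > s.2 then best + 1 else s.2)

-- Loop invariant tying A's stack to B's dp table over the processed prefix p.
def StInv (p st dp : List Int) : Prop :=
  st.Pairwise (· < ·) ∧ dp.length = p.length ∧
  (∀ j, j < st.length → ∃ k, k < p.length ∧ dp.getD k 0 = (j : Int) + 1 ∧ p.getD k 0 = st.getD j 0) ∧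
  (∀ k, k < p.length → 1 ≤ dp.getD k 0 ∧ dp.getD k 0 ≤ (st.length : Int) ∧
      st.getD ((dp.getD k 0).toNat - 1) 0 ≤ p.getD k 0)

lemma afold (d : PySem.Dict Int Int) :
    ∀ (arr : List Int) (st : List Int),
      arr.foldl (fun stack num =>
        match d.get? num with
        | none => stack
        | some idx =>
          let i := PySem.List.bisectLeft stack idx
          let stack' := if i = stack.length then stack ++ [0] else stack
          stack'.set i idx) st
      = (arr.filterMap (fun num => d.get? num)).foldl astep st := by
  intro arr
  induction arr with
  | nil => intro st; rfl
  | cons num rest ih =>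
    intro st
    simp only [List.foldl_cons, List.filterMap_cons]
    cases hd : d.get? num with
    | none => simpa using ih st
    | some idx => simpa [astep] using ih _

lemma zip_trunc : ∀ (p dp rest : List Int), dp.length = p.length →
    (p ++ rest).zip dp = p.zip dp := by
  intro p
  induction p with
  | nil =>
    intro dp rest h
    have : dp = [] := List.length_eq_zero_iff.mp (by simpa using h)
    simp [this]
  | cons a p ih =>
    intro dp rest h
    cases dp with
    | nil => simp at h
    | cons b dp =>
      simp only [List.cons_append, List.zip_cons_cons]
      rw [ih dp rest (by simpa using h)]

lemma bbest_spec (v : Int) : ∀ (l : List (Int × Int)) (b0 : Int),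
    b0 ≤ bbest v l b0 ∧
    (bbest v l b0 = b0 ∨ ∃ xd ∈ l, xd.1 < v ∧ xd.2 = bbest v l b0) ∧
    (∀ xd ∈ l, xd.1 < v → xd.2 ≤ bbest v l b0) := by
  intro l
  induction l with
  | nil => intro b0; simp [bbest]
  | cons xd t ih =>
    intro b0
    simp only [bbest, List.foldl_cons] at *
    by_cases hc : xd.1 < v ∧ xd.2 > b0
    · obtain ⟨h1, h2, h3⟩ := ih xd.2
      rw [if_pos hc]
      refine ⟨le_trans (le_of_lt hc.2) h1, ?_, ?_⟩
      · rcases h2 with he | ⟨yd, hm, hy⟩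
        · exact Or.inr ⟨xd, List.mem_cons_self, hc.1, he.symm ▸ rfl⟩
        · exact Or.inr ⟨yd, List.mem_cons_of_mem _ hm, hy⟩
      · intro yd hm hlt
        rcases List.mem_cons.mp hm with rfl | hm'
        · exact h1
        · exact h3 yd hm' hlt
    · obtain ⟨h1, h2, h3⟩ := ih b0
      rw [if_neg hc]
      refine ⟨h1, ?_, ?_⟩
      · rcases h2 with he | ⟨yd, hm, hy⟩
        · exact Or.inl he
        · exact Or.inr ⟨yd, List.mem_cons_of_mem _ hm, hy⟩
      · intro yd hm hlt
        rcases List.mem_cons.mp hm with rfl | hm'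
        · have : yd.2 ≤ b0 := by
            by_contra hgt
            exact hc ⟨hlt, by omega⟩
          exact le_trans this h1
        · exact h3 yd hm' hlt


lemma bbest_eq_bisect (p st dp : List Int) (v : Int) (h : StInv p st dp) :
    bbest v (p.zip dp) 0 = ((PySem.List.bisectLeft st v : Nat) : Int) := by
  obtain ⟨hs, hlen, hach, hmin⟩ := h
  obtain ⟨hle, hltb, hgeb⟩ := PySem.List.bisectLeft_spec st v (hs.imp le_of_lt)
  obtain ⟨h0, hex, hub⟩ := bbest_spec v (p.zip dp) 0
  have hup : bbest v (p.zip dp) 0 ≤ ((PySem.List.bisectLeft st v : Nat) : Int) := by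
    rcases hex with he | ⟨xd, hm, hxv, hxd⟩
    · rw [he]; exact Int.natCast_nonneg _
    · obtain ⟨k, hk, hkeq⟩ := List.mem_iff_getElem.mp hm
      have hkp : k < p.length := by
        simp only [List.length_zip, hlen] at hk; omega
      have hkd : k < dp.length := by omega
      have hx1 : xd.1 = p.getD k 0 := by
        rw [← hkeq, List.getElem_zip, List.getD_eq_getElem p 0 hkp]
      have hx2 : xd.2 = dp.getD k 0 := by
        rw [← hkeq, List.getElem_zip, List.getD_eq_getElem dp 0 hkd]
      obtain ⟨hm1, hm2, hm3⟩ := hmin k hkp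
      rw [← hxd, hx2]
      by_contra hcon
      push Not at hcon
      have hmi : PySem.List.bisectLeft st v ≤ (dp.getD k 0).toNat - 1 := by omega
      have hmlen : (dp.getD k 0).toNat - 1 < st.length := by omega
      have hvle := hgeb _ hmlen hmi
      rw [List.getD_eq_getElem st 0 hmlen] at hm3
      have hpv : p.getD k 0 < v := hx1 ▸ hxv
      omega
  have hdown : ((PySem.List.bisectLeft st v : Nat) : Int) ≤ bbest v (p.zip dp) 0 := by
    rcases Nat.eq_zero_or_pos (PySem.List.bisectLeft st v) with hz | hpos
    · rw [hz]; exact_mod_cast h0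
    · have hi1 : PySem.List.bisectLeft st v - 1 < st.length := by omega
      have hlt1 : st[PySem.List.bisectLeft st v - 1] < v := hltb _ hi1 (by omega)
      obtain ⟨k, hk, hdpk, hpk⟩ := hach (PySem.List.bisectLeft st v - 1) hi1
      have hkd : k < dp.length := by omega
      have hmem : (p.getD k 0, dp.getD k 0) ∈ p.zip dp := by
        apply List.mem_iff_getElem.mpr
        refine ⟨k, by simp [List.length_zip, hlen]; omega, ?_⟩
        rw [List.getElem_zip, List.getD_eq_getElem p 0 hk, List.getD_eq_getElem dp 0 hkd]
      have hb := hub _ hmem (by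
        simp only
        rw [hpk, List.getD_eq_getElem st 0 hi1]; exact hlt1)
      simp only at hb
      rw [hdpk] at hb
      have : ((PySem.List.bisectLeft st v - 1 : Nat) : Int) + 1
           = ((PySem.List.bisectLeft st v : Nat) : Int) := by push_cast [hpos]; omega
      omega
  omega

lemma astep_eq (st : List Int) (v : Int) :
    astep st v =
      if PySem.List.bisectLeft st v = st.length then st ++ [v]
      else st.set (PySem.List.bisectLeft st v) v := by
  show (if PySem.List.bisectLeft st v = st.length then st ++ [0] else st).set
      (PySem.List.bisectLeft st v) v = _
  by_cases hc : PySem.List.bisectLeft st v = st.length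
  · rw [if_pos hc, if_pos hc, hc, List.set_append_right _ _ le_rfl]
    simp
  · rw [if_neg hc, if_neg hc]

lemma step_inv (p st dp : List Int) (v : Int) (h : StInv p st dp) :
    StInv (p ++ [v]) (astep st v) (dp ++ [bbest v (p.zip dp) 0 + 1]) := by
  obtain ⟨hs, hlen, hach, hmin⟩ := h
  obtain ⟨hle, hltb, hgeb⟩ := PySem.List.bisectLeft_spec st v (hs.imp le_of_lt)
  rw [bbest_eq_bisect p st dp v ⟨hs, hlen, hach, hmin⟩, astep_eq]
  by_cases hc : PySem.List.bisectLeft st v = st.length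
  · rw [if_pos hc]
    refine ⟨?_, by simp [hlen], ?_, ?_⟩
    · refine List.pairwise_append.mpr ⟨hs, List.pairwise_singleton _ _, ?_⟩
      intro x hx y hy
      obtain ⟨j, hj, rfl⟩ := List.mem_iff_getElem.mp hx
      have hyv : y = v := by simpa using hy
      subst hyv
      exact hltb j hj (by omega)
    · intro j hj
      simp only [List.length_append, List.length_cons, List.length_nil] at hj
      by_cases hj' : j < st.length
      · obtain ⟨k, hk, h1, h2⟩ := hach j hj'
        refine ⟨k, by simp; omega, ?_, ?_⟩
        · rw [List.getD_append dp _ 0 k (by omega)]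
          exact h1
        · rw [List.getD_append p _ 0 k hk, List.getD_append st _ 0 j hj']
          exact h2
      · have hj2 : j = st.length := by omega
        subst hj2
        refine ⟨p.length, by simp, ?_, ?_⟩
        · rw [List.getD_append_right dp _ 0 _ (by omega)]
          simp [hlen, hc]
        · rw [List.getD_append_right p _ 0 _ le_rfl,
              List.getD_append_right st _ 0 _ le_rfl]
          simp
    · intro k hk
      simp only [List.length_append, List.length_cons, List.length_nil] at hk
      by_cases hk' : k < p.length
      · obtain ⟨m1, m2, m3⟩ := hmin k hk'
        rw [List.getD_append dp _ 0 k (by omega), List.getD_append p _ 0 k hk']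
        have hidx : (dp.getD k 0).toNat - 1 < st.length := by omega
        rw [List.getD_append st _ 0 _ hidx]
        refine ⟨m1, by
          rw [List.length_append]
          push_cast
          omega, m3⟩
      · have hk2 : k = p.length := by omega
        subst hk2
        rw [List.getD_append_right dp _ 0 _ (by omega),
            List.getD_append_right p _ 0 _ le_rfl]
        simp only [hlen, Nat.sub_self, List.getD_cons_zero]
        refine ⟨by omega, by
          simp
          omega, ?_⟩
        have htn : (((PySem.List.bisectLeft st v : Nat) : Int) + 1).toNat - 1 = st.length := by
          omega
        rw [htn, List.getD_append_right st _ 0 _ le_rfl]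
        simp
  · rw [if_neg hc]
    have hilt : PySem.List.bisectLeft st v < st.length := by omega
    have hvle : v ≤ st[PySem.List.bisectLeft st v] := hgeb _ hilt le_rfl
    have hget : ∀ j, j < st.length →
        (st.set (PySem.List.bisectLeft st v) v).getD j 0 =
          if PySem.List.bisectLeft st v = j then v else st.getD j 0 := by
      intro j hj
      rw [List.getD_eq_getElem _ 0 (by simp [hj]), List.getElem_set]
      split_ifs with hij
      · rfl
      · rw [List.getD_eq_getElem st 0 hj]
    refine ⟨?_, by simp [hlen], ?_, ?_⟩
    · rw [List.pairwise_iff_getElem]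
      intro a b ha hb hab
      simp only [List.length_set] at ha hb
      rw [List.getElem_set, List.getElem_set]
      split_ifs with h1 h2
      · omega
      · have h3 : st[PySem.List.bisectLeft st v] < st[b] :=
          List.pairwise_iff_getElem.mp hs _ b hilt hb (by omega)
        omega
      · exact hltb a ha (by omega)
      · exact List.pairwise_iff_getElem.mp hs a b ha hb hab
    · intro j hj
      simp only [List.length_set] at hj
      by_cases hji : j = PySem.List.bisectLeft st v
      · subst hji
        refine ⟨p.length, by simp, ?_, ?_⟩
        · rw [List.getD_append_right dp _ 0 _ (by omega)]
          simp [hlen]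
        · rw [List.getD_append_right p _ 0 _ le_rfl, hget _ hj, if_pos rfl]
          simp
      · obtain ⟨k, hk, h1, h2⟩ := hach j hj
        refine ⟨k, by simp; omega, ?_, ?_⟩
        · rw [List.getD_append dp _ 0 k (by omega)]
          exact h1
        · rw [List.getD_append p _ 0 k hk, hget _ hj, if_neg (by omega)]
          exact h2
    · intro k hk
      simp only [List.length_append, List.length_cons, List.length_nil] at hk
      by_cases hk' : k < p.length
      · obtain ⟨m1, m2, m3⟩ := hmin k hk'
        rw [List.getD_append dp _ 0 k (by omega), List.getD_append p _ 0 k hk']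
        have hidx : (dp.getD k 0).toNat - 1 < st.length := by omega
        rw [hget _ hidx]
        refine ⟨m1, by
          rw [List.length_set]
          exact m2, ?_⟩
        split_ifs with him
        · rw [← him] at m3
          rw [List.getD_eq_getElem st 0 hilt] at m3
          omega
        · exact m3
      · have hk2 : k = p.length := by omega
        subst hk2
        rw [List.getD_append_right dp _ 0 _ (by omega),
            List.getD_append_right p _ 0 _ le_rfl]
        simp only [hlen, Nat.sub_self, List.getD_cons_zero]
        refine ⟨by omega, by
          simp
          omega, ?_⟩
        have htn : (((PySem.List.bisectLeft st v : Nat) : Int) + 1).toNat - 1 =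
            PySem.List.bisectLeft st v := by omega
        rw [htn, hget _ hilt, if_pos rfl]

lemma step_len (p st dp : List Int) (v : Int) (h : StInv p st dp) :
    ((astep st v).length : Int) =
      (if bbest v (p.zip dp) 0 + 1 > (st.length : Int) then bbest v (p.zip dp) 0 + 1
       else (st.length : Int)) := by
  rw [bbest_eq_bisect p st dp v h, astep_eq]
  have hle : PySem.List.bisectLeft st v ≤ st.length :=
    (PySem.List.bisectLeft_spec st v (h.1.imp le_of_lt)).1
  by_cases hc : PySem.List.bisectLeft st v = st.length
  · rw [if_pos hc]
    rw [if_pos (by omega)]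
    simp [← hc]
  · rw [if_neg hc, List.length_set]
    rw [if_neg (by omega)]

lemma main_loop : ∀ (rest p st dp : List Int), StInv p st dp →
    ((rest.foldl astep st).length : Int) =
      (rest.foldl (bstep (p ++ rest)) (dp, (st.length : Int))).2 := by
  intro rest
  induction rest with
  | nil => intro p st dp h; rfl
  | cons v rest ih =>
    intro p st dp h
    have hlen : dp.length = p.length := h.2.1
    simp only [List.foldl_cons]
    have hz : (p ++ v :: rest).zip dp = p.zip dp := zip_trunc p dp (v :: rest) hlen
    have hb : bstep (p ++ v :: rest) (dp, (st.length : Int)) v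
        = (dp ++ [bbest v (p.zip dp) 0 + 1], ((astep st v).length : Int)) := by
      show (dp ++ [bbest v ((p ++ v :: rest).zip dp) 0 + 1],
            if bbest v ((p ++ v :: rest).zip dp) 0 + 1 > (st.length : Int)
            then bbest v ((p ++ v :: rest).zip dp) 0 + 1 else (st.length : Int)) = _
      rw [hz, ← step_len p st dp v h]
    rw [hb]
    have hpe : p ++ v :: rest = (p ++ [v]) ++ rest := by simp
    rw [hpe]
    exact ih (p ++ [v]) (astep st v) (dp ++ [bbest v (p.zip dp) 0 + 1]) (step_inv p st dp v h)

-- ===== VERDICT (by name: the statement is the Claim_ definition above) =====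
theorem min0perations_spec : Claim_equal_min0perations := by
  intro target arr _
  show min0perations target arr = min0perations_alt target arr
  simp only [min0perations, min0perations_alt]
  rw [afold ((PySem.List.enumerate target).foldl (fun d p => d.insert p.2 p.1)
      PySem.Dict.empty) arr []]
  have hM := main_loop (arr.filterMap (fun num =>
      (((PySem.List.enumerate target).foldl (fun d p => d.insert p.2 p.1)
        PySem.Dict.empty).get? num))) [] [] []
    ⟨List.Pairwise.nil, rfl, by simp, by simp⟩
  simp only [List.nil_append, List.length_nil, Nat.cast_zero] at hM
  rw [hM]
  rfl
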